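-- pv_equiv track=rewrite | github.com/PashaShahbazi/pasha_lexer | pasha_lexer.py | ilg
-- ===== SOURCE A (Python) =====
-- def ilg(lexim):
--     j = 0
--     state = 0
--     while True:
--         ch = lexim[j]
--         match state:
--             case 0:
--                 if ch == 'i':
--                     state = 1
--                     j += 1
--                 else:
--                     state = 4
--             case 1:
--                 if ch == 'l':
--                     state = 2
--                     j += 1
--                 else:
--                     state = 4
--             case 2:
--                 if ch == 'g':
--                     state = 3
--                     j += 1
--                 else:
--                     state = 4
--             case 3:
--                 if ch == '\n':
--                     return True, '<mknumber>'
--                 else: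
--                     state = 4
--             case 4:
--                 return False, None
-- ===== SOURCE B (Python) =====
-- def ilg(lexim):
--     if lexim.startswith('ilg\n'):
--         return True, '<mknumber>'
--     return False, None
-- ===== Notes on version B (the rewrite author's own statement) =====
-- stated objective: simpler
-- what changed: Replaces the explicit 5-state state machine with an index variable by a single startswith('ilg\n') prefix test; Pre_ excludes the four proper prefixes of 'ilg\n' ('', 'i', 'il', 'ilg'), on which A raises IndexError (B returns (False, None) there).
import Mathlib
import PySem

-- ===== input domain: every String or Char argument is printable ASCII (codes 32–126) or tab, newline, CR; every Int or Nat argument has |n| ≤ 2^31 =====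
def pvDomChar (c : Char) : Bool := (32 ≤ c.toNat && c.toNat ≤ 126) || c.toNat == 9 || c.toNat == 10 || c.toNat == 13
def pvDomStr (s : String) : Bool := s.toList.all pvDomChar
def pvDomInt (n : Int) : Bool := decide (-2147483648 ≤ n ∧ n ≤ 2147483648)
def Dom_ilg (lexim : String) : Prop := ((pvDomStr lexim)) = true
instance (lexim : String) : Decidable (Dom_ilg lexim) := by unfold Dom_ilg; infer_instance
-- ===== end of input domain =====

-- B replaces A's explicit state machine by a single startswith prefix test (simpler).


-- ===== PORT A =====
-- The while-True loop: each iteration reads lexim[j] (IndexError → none, excluded by Pre_)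
-- and dispatches on `state`; every transition increases `state`, which bounds the recursion.
def ilgLoop (cs : List Char) (j : Int) (state : Nat) : Bool × Option String :=
  match PySem.List.pyGet? cs j with
  | none => (false, none)   -- Python raises IndexError here; Pre_ilg excludes these inputs
  | some ch =>
    match state with
    | 0 => if ch = 'i' then ilgLoop cs (j+1) 1 else ilgLoop cs j 4
    | 1 => if ch = 'l' then ilgLoop cs (j+1) 2 else ilgLoop cs j 4
    | 2 => if ch = 'g' then ilgLoop cs (j+1) 3 else ilgLoop cs j 4
    | 3 => if ch = '\n' then (true, some "<mknumber>") else ilgLoop cs j 4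
    | _ => (false, none)
termination_by 4 - state
decreasing_by all_goals omega

def ilg (lexim : String) : Bool × Option String := ilgLoop lexim.toList 0 0

-- ===== PORT B =====
def ilg_alt (lexim : String) : Bool × Option String :=
  if PySem.Str.startswith lexim "ilg\n" then (true, some "<mknumber>") else (false, none)

-- ===== PRECONDITION & SPEC =====
-- Pre_ excludes exactly the four inputs on which A raises IndexError: the proper prefixes of "ilg\n".
def Pre_ilg (lexim : String) : Prop :=
  lexim.toList ≠ [] ∧ lexim.toList ≠ ['i'] ∧ lexim.toList ≠ ['i','l'] ∧ lexim.toList ≠ ['i','l','g']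
instance (lexim : String) : Decidable (Pre_ilg lexim) := by unfold Pre_ilg; infer_instance
def pvWitness_ilg : String := "ilg\n"

def Spec_ilg (lexim : String) (out : Bool × Option String) : Prop := out = ilg_alt lexim
instance (lexim : String) (out : Bool × Option String) : Decidable (Spec_ilg lexim out) := by unfold Spec_ilg; infer_instance

-- ===== CLAIM (what is proved, stated in full; the proofs are below) =====
def Claim_equal_ilg : Prop := ∀ (lexim : String), Dom_ilg lexim → Pre_ilg lexim → Spec_ilg lexim (ilg lexim)

-- ===== LEMMAS AND PROOFS =====
-- In state 4 the loop re-reads lexim[j] (j still in range after a mismatch) and returns (False, None).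
theorem ilgLoop_state4 (cs : List Char) (j : Int) : ilgLoop cs j 4 = (false, none) := by
  rw [ilgLoop]; cases PySem.List.pyGet? cs j <;> rfl

-- A's state machine on any input that is not a proper prefix of "ilg\n" computes B's prefix test.
theorem ilgLoop_key (cs : List Char) (h0 : cs ≠ []) (h1 : cs ≠ ['i'])
    (h2 : cs ≠ ['i','l']) (h3 : cs ≠ ['i','l','g']) :
    ilgLoop cs 0 0 =
      (if PySem.Chars.startswith cs ['i','l','g','\n'] then (true, some "<mknumber>")
       else (false, none)) := by
  match cs with
  | [] => exact absurd rfl h0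
  | c0 :: t0 =>
    have g0 : PySem.List.pyGet? (c0::t0) 0 = some c0 := by
      rw [PySem.List.pyGet?_of_nonneg _ (by norm_num)]; rfl
    by_cases e0 : c0 = 'i'
    · subst e0
      match t0 with
      | [] => exact absurd rfl h1
      | c1 :: t1 =>
        have g1 : PySem.List.pyGet? ('i'::c1::t1) 1 = some c1 := by
          rw [PySem.List.pyGet?_of_nonneg _ (by norm_num)]; rfl
        by_cases e1 : c1 = 'l'
        · subst e1
          match t1 with
          | [] => exact absurd rfl h2
          | c2 :: t2 =>
            have g2 : PySem.List.pyGet? ('i'::'l'::c2::t2) 2 = some c2 := by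
              rw [PySem.List.pyGet?_of_nonneg _ (by norm_num)]; rfl
            by_cases e2 : c2 = 'g'
            · subst e2
              match t2 with
              | [] => exact absurd rfl h3
              | c3 :: t3 =>
                have g3 : PySem.List.pyGet? ('i'::'l'::'g'::c3::t3) 3 = some c3 := by
                  rw [PySem.List.pyGet?_of_nonneg _ (by norm_num)]; rfl
                rw [ilgLoop, g0]; norm_num
                rw [ilgLoop, g1]; norm_num
                rw [ilgLoop, g2]; norm_num
                rw [ilgLoop, g3]
                by_cases e3 : c3 = '\n'
                · simp [e3, PySem.Chars.startswith, List.isPrefixOf]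
                · simp [e3, Ne.symm e3, ilgLoop_state4,
                        PySem.Chars.startswith, List.isPrefixOf]
            · rw [ilgLoop, g0]; norm_num
              rw [ilgLoop, g1]; norm_num
              rw [ilgLoop, g2]
              simp [e2, Ne.symm e2, ilgLoop_state4,
                    PySem.Chars.startswith, List.isPrefixOf]
        · rw [ilgLoop, g0]; norm_num
          rw [ilgLoop, g1]
          simp [e1, Ne.symm e1, ilgLoop_state4,
                PySem.Chars.startswith, List.isPrefixOf]
    · rw [ilgLoop, g0]
      simp [e0, Ne.symm e0, ilgLoop_state4,
            PySem.Chars.startswith, List.isPrefixOf]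

-- ===== VERDICT (by name: the statement is the Claim_ definition above) =====
theorem ilg_spec : Claim_equal_ilg := by
  intro lexim _ hpre
  obtain ⟨h0, h1, h2, h3⟩ := hpre
  show ilg lexim = ilg_alt lexim
  have hs : ("ilg\n" : String).toList = ['i','l','g','\n'] := by decide
  simp only [ilg, ilg_alt, PySem.Str.startswith_eq, hs]
  exact ilgLoop_key lexim.toList h0 h1 h2 h3
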